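-- pv_equiv track=rewrite | github.com/Darshitpipariya/CipherDemo | cipher_fun.py | key_matrix
-- ===== SOURCE A (Python) =====
-- def key_matrix(key, dim):
--     k_matrix = []
--     k = key.replace(' ', '')
--     lower_alpha = "abcdefghijklmnopqrstuvwxyz"
--     upper_alpha = lower_alpha.upper()
--     index = 0
--     ind = 0
--     for i in range(dim):
--         l = []
--         for j in range(dim):
--             if(index < len(k)):
--                 if(k[index].isupper()):
--                     l.append(upper_alpha.index(k[index]))
--                     index += 1
--                 else:
--                     l.append(lower_alpha.index(k[index]))
--                     index += 1
--             else:
--                 l.append(ind)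
--                 ind += 1
--         k_matrix.append(l)
--     return k_matrix
-- ===== SOURCE B (Python) =====
-- LOWER = "abcdefghijklmnopqrstuvwxyz"
-- UPPER = LOWER.upper()
--
--
-- def key_matrix(key, dim):
--     if dim <= 0:
--         return []
--     k = key.replace(' ', '')
--     total = dim * dim
--     flat = [(UPPER.index(c) if c.isupper() else LOWER.index(c)) for c in k[:total]]
--     flat += range(total - len(flat))
--     return [flat[r * dim:(r + 1) * dim] for r in range(dim)]
-- ===== Notes on version B (the rewrite author's own statement) =====
-- stated objective: simpler
-- what changed: Replaces the nested double loop with two position/fill counters by one flat list built in a single comprehension over the truncated key (extended with range() for the sequential fill) and a slicing step that reshapes it into dim rows.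
import Mathlib
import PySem

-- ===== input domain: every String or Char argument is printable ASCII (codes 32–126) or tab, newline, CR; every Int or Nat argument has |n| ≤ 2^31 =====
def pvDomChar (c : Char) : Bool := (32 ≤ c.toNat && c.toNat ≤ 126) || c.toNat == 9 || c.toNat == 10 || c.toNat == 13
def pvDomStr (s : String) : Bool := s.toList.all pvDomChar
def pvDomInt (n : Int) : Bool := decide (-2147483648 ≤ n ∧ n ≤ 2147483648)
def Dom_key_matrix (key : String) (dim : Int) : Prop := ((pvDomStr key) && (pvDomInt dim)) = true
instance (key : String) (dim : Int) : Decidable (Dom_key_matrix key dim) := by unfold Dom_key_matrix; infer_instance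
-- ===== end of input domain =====

-- B replaces A's nested double loop with its two running counters by one flat linear pass
-- (comprehension + range fill) and a reshape into dim-sized rows; objective: simpler.

-- ===== PORT A =====
def kmLower : List Char := "abcdefghijklmnopqrstuvwxyz".toList
def kmUpper : List Char := PySem.Chars.upper kmLower

-- one iteration of A's inner 'for j in range(dim)' body; state = (l, index, ind).
-- '(index? …).getD 0' marks where Python's str.index raises ValueError (excluded by Pre_).
def kmInnerStep (k : List Char) (s : List Int × Int × Int) : List Int × Int × Int :=
  if s.2.1 < (k.length : Int) then
    if PySem.Chars.isupper (PySem.List.pyGetD k s.2.1 ' ') then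
      (s.1 ++ [(((PySem.List.index? kmUpper (PySem.List.pyGetD k s.2.1 ' ')).getD 0 : Nat) : Int)],
       s.2.1 + 1, s.2.2)
    else
      (s.1 ++ [(((PySem.List.index? kmLower (PySem.List.pyGetD k s.2.1 ' ')).getD 0 : Nat) : Int)],
       s.2.1 + 1, s.2.2)
  else (s.1 ++ [s.2.2], s.2.1, s.2.2 + 1)

-- one iteration of A's outer 'for i in range(dim)' body; state = (k_matrix, index, ind).
def kmOuterStep (k : List Char) (dim : Int) (s : List (List Int) × Int × Int) :
    List (List Int) × Int × Int :=
  let inner := (PySem.List.pyRange 0 dim 1).foldl (fun acc _ => kmInnerStep k acc)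
    ([], s.2.1, s.2.2)
  (s.1 ++ [inner.1], inner.2.1, inner.2.2)

def key_matrix (key : String) (dim : Int) : List (List Int) :=
  let k := PySem.Chars.replace key.toList [' '] []
  ((PySem.List.pyRange 0 dim 1).foldl (fun acc _ => kmOuterStep k dim acc) ([], 0, 0)).1

-- ===== PORT B =====
-- 'UPPER.index(c) if c.isupper() else LOWER.index(c)' (getD 0 marks ValueError, excluded by Pre_)
def kmVal (c : Char) : Int :=
  if PySem.Chars.isupper c then (((PySem.List.index? kmUpper c).getD 0 : Nat) : Int)
  else (((PySem.List.index? kmLower c).getD 0 : Nat) : Int)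

def key_matrix_alt (key : String) (dim : Int) : List (List Int) :=
  if dim ≤ 0 then []
  else
    let k := PySem.Chars.replace key.toList [' '] []
    let total := dim * dim
    let flat0 := (PySem.List.slice k none (some total)).map kmVal
    let flat := flat0 ++ PySem.List.pyRange 0 (total - (flat0.length : Int)) 1
    (PySem.List.pyRange 0 dim 1).map (fun r =>
      PySem.List.slice flat (some (r * dim)) (some ((r + 1) * dim)))

-- ===== PRECONDITION & SPEC =====
-- Pre_ excludes exactly the inputs on which A raises ValueError: a non-letter character of the
-- space-stripped key at a position < dim*dim (fed to str.index on the alphabets).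
def Pre_key_matrix (key : String) (dim : Int) : Prop :=
  dim ≤ 0 ∨
    ((PySem.Chars.replace key.toList [' '] []).take (dim * dim).toNat).all
      PySem.Chars.isalpha = true
instance (key : String) (dim : Int) : Decidable (Pre_key_matrix key dim) := by
  unfold Pre_key_matrix; infer_instance

def pvWitness_key_matrix : String × Int := ("HeLLo world", 4)

def Spec_key_matrix (key : String) (dim : Int) (out : List (List Int)) : Prop :=
  out = key_matrix_alt key dim
instance (key : String) (dim : Int) (out : List (List Int)) : Decidable (Spec_key_matrix key dim out) := by
  unfold Spec_key_matrix; infer_instance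

-- ===== CLAIM (what is proved, stated in full; the proofs are below) =====
def Claim_equal_key_matrix : Prop := ∀ (key : String) (dim : Int), Dom_key_matrix key dim →
  Pre_key_matrix key dim → Spec_key_matrix key dim (key_matrix key dim)

-- ===== LEMMAS AND PROOFS =====

-- value of the p-th linear cell (0-based) of the produced matrix
def kmF (k : List Char) (p : Nat) : Int :=
  if p < k.length then kmVal (k.getD p ' ') else (p : Int) - (k.length : Int)

theorem km_pyRange_nonpos (n : Int) (h : n ≤ 0) : PySem.List.pyRange 0 n 1 = [] := by
  simp [PySem.List.pyRange]; omega

-- A's inner loop, run from the state reached after c cells, appends cells c, c+1, …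
theorem km_inner_run {α : Type} (k : List Char) (l : List α) :
    ∀ (c : Nat) (acc : List Int),
    l.foldl (fun s _ => kmInnerStep k s)
      (acc, ((min c k.length : Nat) : Int), ((c - k.length : Nat) : Int))
    = (acc ++ (List.range' c l.length).map (kmF k),
       ((min (c + l.length) k.length : Nat) : Int),
       (((c + l.length) - k.length : Nat) : Int)) := by
  induction l with
  | nil => intro c acc; simp
  | cons x t ih =>
    intro c acc
    have hstep : kmInnerStep k (acc, ((min c k.length : Nat) : Int), ((c - k.length : Nat) : Int))
        = (acc ++ [kmF k c], ((min (c+1) k.length : Nat) : Int),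
           (((c+1) - k.length : Nat) : Int)) := by
      by_cases hc : c < k.length
      · have hmin : min c k.length = c := by omega
        have e1 : ((min (c+1) k.length : Nat) : Int) = ((min c k.length : Nat) : Int) + 1 := by
          omega
        have e2 : (((c+1) - k.length : Nat) : Int) = ((c - k.length : Nat) : Int) := by omega
        have hv : kmF k c = kmVal (k.getD c ' ') := by simp [kmF, hc]
        rw [e1, e2, hv]
        simp only [kmInnerStep, hmin, PySem.List.pyGetD_natCast]
        rw [if_pos (by exact_mod_cast hc : ((c : Nat) : Int) < (k.length : Int))]
        simp only [kmVal]
        split_ifs <;> rfl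
      · have hmin : min c k.length = k.length := by omega
        have e1 : ((min (c+1) k.length : Nat) : Int) = ((min c k.length : Nat) : Int) := by omega
        have e2 : (((c+1) - k.length : Nat) : Int) = ((c - k.length : Nat) : Int) + 1 := by omega
        have hv : kmF k c = ((c - k.length : Nat) : Int) := by
          simp only [kmF, if_neg hc]
          omega
        rw [e1, e2, hv]
        simp only [kmInnerStep, hmin]
        rw [if_neg (by omega : ¬ ((k.length : Nat) : Int) < (k.length : Int))]
    rw [List.foldl_cons, hstep, ih (c+1) (acc ++ [kmF k c])]
    rw [List.length_cons, List.range'_succ, List.map_cons]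
    simp only [List.append_assoc, List.singleton_append, Prod.mk.injEq, true_and]
    refine ⟨?_, ?_⟩ <;> omega

-- A's outer loop, run from the state reached after r full rows of dim cells
theorem km_outer_run {α : Type} (k : List Char) (d : Nat) (l : List α) :
    ∀ (r : Nat) (acc : List (List Int)),
    l.foldl (fun s _ => kmOuterStep k (d : Int) s)
      (acc, ((min (r * d) k.length : Nat) : Int), ((r * d - k.length : Nat) : Int))
    = (acc ++ (List.range' r l.length).map
        (fun i => (List.range' (i * d) d).map (kmF k)),
       ((min ((r + l.length) * d) k.length : Nat) : Int),
       (((r + l.length) * d - k.length : Nat) : Int)) := by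
  induction l with
  | nil => intro r acc; simp
  | cons x t ih =>
    intro r acc
    have hstep : kmOuterStep k (d : Int)
        (acc, ((min (r * d) k.length : Nat) : Int), ((r * d - k.length : Nat) : Int))
        = (acc ++ [(List.range' (r * d) d).map (kmF k)],
           ((min ((r+1) * d) k.length : Nat) : Int),
           (((r+1) * d - k.length : Nat) : Int)) := by
      simp only [kmOuterStep, PySem.List.pyRange_zero_natCast]
      rw [km_inner_run k _ (r * d) []]
      simp only [List.nil_append, List.length_map, List.length_range]
      rw [show r * d + d = (r+1) * d from by ring]
    rw [List.foldl_cons, hstep, ih (r+1) _]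
    rw [show r + 1 + t.length = r + (t.length + 1) from by omega]
    simp [List.range'_succ]

-- characterisation of port A for a nonnegative dimension
theorem km_A (key : String) (n : Nat) :
    key_matrix key (n : Int)
    = (List.range n).map
        (fun i => (List.range' (i * n) n).map
          (kmF (PySem.Chars.replace key.toList [' '] []))) := by
  set k := PySem.Chars.replace key.toList [' '] [] with hk
  show ((PySem.List.pyRange 0 (n : Int) 1).foldl (fun acc _ => kmOuterStep k (n : Int) acc)
    ([], 0, 0)).1 = _
  rw [PySem.List.pyRange_zero_natCast]
  have h := km_outer_run k n (List.map (fun j => ((j : Nat) : Int)) (List.range n)) 0 []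
  simp only [Nat.zero_mul, Nat.zero_min, Nat.zero_sub, Nat.cast_zero, zero_add,
    List.length_map, List.length_range, List.nil_append] at h
  rw [h, List.range_eq_range']

-- the flat list B builds lists the kmF-values of all t cells
theorem km_flat (k : List Char) (t : Nat) :
    (k.take t).map kmVal ++ PySem.List.pyRange 0 ((t - min t k.length : Nat) : Int) 1
    = (List.range t).map (kmF k) := by
  rw [PySem.List.pyRange_zero_natCast]
  apply List.ext_getElem
  · simp only [List.length_append, List.length_map, List.length_take, List.length_range]
    omega
  · intro p hp hq
    simp only [List.length_append, List.length_map, List.length_take, List.length_range] at hp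
    have hpt : p < t := by simpa using hq
    by_cases hc : p < min t k.length
    · rw [List.getElem_append_left (by simpa using hc)]
      have hpk : p < k.length := by omega
      simp only [List.getElem_map, List.getElem_take, List.getElem_range]
      simp [kmF, hpk]
    · rw [List.getElem_append_right (by simp only [List.length_map, List.length_take]; omega)]
      simp only [List.getElem_map, List.getElem_range, List.length_map, List.length_take]
      have hkp : k.length ≤ p := by omega
      simp only [kmF, if_neg (by omega : ¬ p < k.length)]
      have hmin : min t k.length = k.length := by omega
      rw [hmin]
      omega

-- characterisation of port B for a positive dimension: km_A's right-hand side
theorem km_B (key : String) (n : Nat) (hn : 0 < n) :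
    key_matrix_alt key (n : Int)
    = (List.range n).map
        (fun i => (List.range' (i * n) n).map
          (kmF (PySem.Chars.replace key.toList [' '] []))) := by
  set k := PySem.Chars.replace key.toList [' '] [] with hk
  have hnn : ¬ ((n : Int) ≤ 0) := by exact_mod_cast not_le.mpr (by exact_mod_cast hn)
  simp only [key_matrix_alt, if_neg hnn]
  have ht : (n : Int) * (n : Int) = ((n * n : Nat) : Int) := by push_cast; ring
  rw [ht, PySem.List.slice_to _ (by positivity), Int.toNat_natCast]
  have hfill : ((n * n : Nat) : Int) - ((((k.take (n*n)).map kmVal).length : Nat) : Int)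
      = ((n*n - min (n*n) k.length : Nat) : Int) := by
    simp only [List.length_map, List.length_take]
    push_cast
    omega
  rw [hfill]
  rw [km_flat k (n*n)]
  rw [PySem.List.pyRange_zero_natCast, List.map_map]
  apply List.map_congr_left
  intro r hr
  have hrd : r < n := List.mem_range.mp hr
  have hrn : r * n + n ≤ n * n := by
    have h := Nat.mul_le_mul_right n (show r + 1 ≤ n from hrd)
    rw [Nat.succ_mul] at h
    omega
  simp only [Function.comp_apply]
  have h1 : ((r : Int) * (n : Int)) = ((r * n : Nat) : Int) := by push_cast; ring
  have h2 : (((r : Int) + 1) * (n : Int)) = (((r+1) * n : Nat) : Int) := by push_cast; ring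
  rw [h1, h2, PySem.List.slice_toNat _ (by positivity) (by positivity),
    Int.toNat_natCast, Int.toNat_natCast]
  rw [show (r+1) * n - r * n = n from by rw [Nat.succ_mul]; omega]
  apply List.ext_getElem
  · simp
    omega
  · intro i hi1 hi2
    simp

-- ===== VERDICT (by name: the statement is the Claim_ definition above) =====
theorem key_matrix_spec : Claim_equal_key_matrix := by
  intro key dim _ _
  unfold Spec_key_matrix
  by_cases hd : dim ≤ 0
  · show ((PySem.List.pyRange 0 dim 1).foldl _ ([], 0, 0)).1 = _
    rw [km_pyRange_nonpos dim hd]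
    simp [key_matrix_alt, hd]
  · obtain ⟨n, rfl⟩ : ∃ n : Nat, dim = (n : Int) := ⟨dim.toNat, by omega⟩
    rw [km_A, km_B key n (by exact_mod_cast not_le.mp hd)]
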